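-- pv_equiv track=rewrite | github.com/Buty800/UBA-CS | 24-1C/IP/Guias Python/ParcialViejo.py | un_responsable_por_turno
-- ===== SOURCE A (Python) =====
-- def transponer(matriz:list[list])->list[list]:
--     rows = len(matriz)
--     cols = len(matriz[0])
--     res:list[list] = []
--
--     for _ in range(cols): res.append([])
--
--     for i in range(rows):
--         for j in range(cols):
--             res[j].append(matriz[i][j])
--     return res
--
-- def equal_from_to(seq:list,a:int,b:int)->bool:
--     for i in range(a,b):
--         if seq[i] != seq[i+1]: return False
--     return True
--
-- def un_responsable_por_turno(grilla_horaria: list[list[str]])->list[tuple[bool,bool]]: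
--
--     grilla_t:list[list[str]] = transponer(grilla_horaria)
--     res:list[tuple[bool,bool]] = []
--
--     for dia in grilla_t:
--         turno_mañana:bool = equal_from_to(dia,0,3)
--         turno_tarde:bool = equal_from_to(dia,4,7)
--         res.append((turno_mañana,turno_tarde))
--
--     return res
-- ===== SOURCE B (Python) =====
-- def un_responsable_por_turno(grilla_horaria: list[list[str]]) -> list[tuple[bool, bool]]:
--     cols = len(grilla_horaria[0])
--     manana = [len({grilla_horaria[i][j] for i in range(0, 4)}) == 1 for j in range(cols)]
--     tarde = [len({grilla_horaria[i][j] for i in range(4, 8)}) == 1 for j in range(cols)]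
--     return list(zip(manana, tarde))
-- ===== Notes on version B (the rewrite author's own statement) =====
-- stated objective: idiomatic
-- what changed: B replaces the transpose + adjacent-pair index scans by a distinct-count criterion: per column it builds the set of the four entries of each shift block and tests len(set)==1, producing the two per-shift boolean lists and zipping them; Pre_ excludes grids with fewer than 8 rows (and a nonempty first row), where A can still return via an early-mismatch short-circuit before its IndexError but B raises.
-- outside the precondition, e.g. on un_responsable_por_turno([['a'], ['b'], ['c'], ['d'], ['e'], ['f']]): A returns [(False, False)], B raises IndexError
import Mathlib
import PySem

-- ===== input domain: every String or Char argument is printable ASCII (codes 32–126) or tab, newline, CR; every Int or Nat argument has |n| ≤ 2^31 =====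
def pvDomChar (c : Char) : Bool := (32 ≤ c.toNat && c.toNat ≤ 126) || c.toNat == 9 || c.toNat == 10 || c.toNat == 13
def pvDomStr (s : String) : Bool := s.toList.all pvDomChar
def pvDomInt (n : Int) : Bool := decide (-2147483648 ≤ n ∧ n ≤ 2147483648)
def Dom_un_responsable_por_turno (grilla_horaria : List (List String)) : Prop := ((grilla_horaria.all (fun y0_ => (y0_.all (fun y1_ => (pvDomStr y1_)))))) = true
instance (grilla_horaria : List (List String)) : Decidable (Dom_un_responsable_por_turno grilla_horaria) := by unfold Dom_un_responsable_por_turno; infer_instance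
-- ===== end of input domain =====

-- B drops the transpose and the adjacent-pair scans: per column it tests uniformity of each
-- shift block by building the set of its four entries and checking len(set) == 1, then zips
-- the two per-shift lists (objective: idiomatic).


-- ===== PORT A =====
-- transponer: builds `cols` empty lists, then appends matriz[i][j] to res[j] row by row.
-- matriz[0] / matriz[i][j] are in range whenever the Python returns (Pre_ below); getD is exact there.
def transponerA (matriz : List (List String)) : List (List String) :=
  let rows := matriz.length
  let cols := (matriz.getD 0 []).length
  let res : List (List String) := List.replicate cols []
  (List.range rows).foldl (fun res i =>
    (List.range cols).foldl (fun res j =>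
      res.set j (res.getD j [] ++ [(matriz.getD i []).getD j ""])) res) res

-- equal_from_to: scans i = a..b-1, early False on seq[i] != seq[i+1] (indices in range under Pre_).
def equal_from_toA (seq : List String) (a b : Nat) : Bool :=
  if _h : a < b then
    if seq.getD a "" != seq.getD (a + 1) "" then false
    else equal_from_toA seq (a + 1) b
  else true
termination_by b - a

def un_responsable_por_turno (grilla_horaria : List (List String)) : List (Bool × Bool) :=
  let grilla_t := transponerA grilla_horaria
  grilla_t.foldl (fun res dia => res ++ [(equal_from_toA dia 0 3, equal_from_toA dia 4 7)]) []

-- ===== PORT B =====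
-- grilla_horaria[i][j]: in range whenever Python B evaluates it under Pre_; getD is exact there.
-- The set comprehension is PySem.Set.ofList; only its length is used (order-independent).
def un_responsable_por_turno_alt (grilla_horaria : List (List String)) : List (Bool × Bool) :=
  let cols := (grilla_horaria.getD 0 []).length
  let manana := (List.range cols).map (fun j =>
    ((PySem.Set.ofList ((List.range' 0 4).map
        (fun i => (grilla_horaria.getD i []).getD j ""))).length == 1))
  let tarde := (List.range cols).map (fun j =>
    ((PySem.Set.ofList ((List.range' 4 4).map
        (fun i => (grilla_horaria.getD i []).getD j ""))).length == 1))
  manana.zip tarde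

-- ===== PRECONDITION & SPEC =====
-- Pre_ excludes grids with a nonempty first row and fewer than 8 rows: A may still RETURN there
-- via equal_from_to's early-mismatch short-circuit before its IndexError, but B indexes rows
-- 4..7 unconditionally and raises; the remaining excluded inputs are exactly where A raises.
def Pre_un_responsable_por_turno (grilla_horaria : List (List String)) : Prop :=
  grilla_horaria ≠ [] ∧
  (∀ row ∈ grilla_horaria, (grilla_horaria.getD 0 []).length ≤ row.length) ∧
  ((grilla_horaria.getD 0 []).length = 0 ∨ 8 ≤ grilla_horaria.length)

instance (grilla_horaria : List (List String)) : Decidable (Pre_un_responsable_por_turno grilla_horaria) := by unfold Pre_un_responsable_por_turno; infer_instance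

def pvWitness_un_responsable_por_turno : List (List String) :=
  [["a"], ["a"], ["b"], ["b"], ["c"], ["c"], ["c"], ["c"]]

def Spec_un_responsable_por_turno (grilla_horaria : List (List String)) (out : List (Bool × Bool)) : Prop := out = un_responsable_por_turno_alt grilla_horaria
instance (grilla_horaria : List (List String)) (out : List (Bool × Bool)) : Decidable (Spec_un_responsable_por_turno grilla_horaria out) := by unfold Spec_un_responsable_por_turno; infer_instance

-- ===== CLAIM (what is proved, stated in full; the proofs are below) =====
def Claim_equal_un_responsable_por_turno : Prop := ∀ (grilla_horaria : List (List String)), Dom_un_responsable_por_turno grilla_horaria → Pre_un_responsable_por_turno grilla_horaria → Spec_un_responsable_por_turno grilla_horaria (un_responsable_por_turno grilla_horaria)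


-- ===== LEMMAS AND PROOFS =====

-- equal_from_toA is the full conjunction over [a, b) (both sides short-circuit identically)
theorem equal_from_toA_eq_all (seq : List String) (a b : Nat) :
    equal_from_toA seq a b =
      (List.range' a (b - a)).all (fun i => seq.getD i "" == seq.getD (i + 1) "") := by
  by_cases h : a < b
  · have hn : b - a = (b - (a + 1)) + 1 := by omega
    rw [hn, List.range'_succ, equal_from_toA]
    simp only [h, dite_true]
    by_cases hb : seq.getD a "" = seq.getD (a + 1) ""
    all_goals simp only [List.getD_eq_getElem?_getD] at hb
    · simp [hb, equal_from_toA_eq_all seq (a + 1) b]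
    · simp [bne_iff_ne, hb]
  · have hn : b - a = 0 := by omega
    rw [equal_from_toA]
    simp [h, hn]
termination_by b - a

-- the inner transpose loop preserves length
theorem innerFold_length (js : List Nat) (f : Nat → String) (acc : List (List String)) :
    (js.foldl (fun r j => r.set j (r.getD j [] ++ [f j])) acc).length = acc.length := by
  induction js generalizing acc with
  | nil => rfl
  | cons j js ih => rw [List.foldl_cons, ih, List.length_set]

-- pointwise effect of the inner transpose loop (distinct indices)
theorem innerFold_getElem? (js : List Nat) (hnd : js.Nodup) (f : Nat → String)
    (acc : List (List String)) (k : Nat) :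
    (js.foldl (fun r j => r.set j (r.getD j [] ++ [f j])) acc)[k]? =
      if k ∈ js then acc[k]?.map (fun c => c ++ [f k]) else acc[k]? := by
  induction js generalizing acc with
  | nil => simp
  | cons j js ih =>
    have hnd' : js.Nodup := hnd.of_cons
    have hj : j ∉ js := (List.nodup_cons.mp hnd).1
    rw [List.foldl_cons, ih hnd']
    by_cases hmem : k ∈ js
    · have hne : j ≠ k := fun h => hj (h ▸ hmem)
      rw [List.getElem?_set_ne hne]
      simp [hmem]
    · by_cases hkj : k = j
      · subst hkj
        simp only [hmem, if_false, List.mem_cons, true_or, if_true]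
        by_cases hlt : k < acc.length
        · rw [List.getElem?_set_self']
          rw [List.getElem?_eq_getElem hlt]
          simp [hlt]
        · rw [List.set_eq_of_length_le (by omega)]
          rw [List.getElem?_eq_none (by omega)]
          simp
      · have hne : j ≠ k := fun h => hkj h.symm
        rw [List.getElem?_set_ne hne]
        simp [hmem, hkj]

-- the outer transpose loop: length stays cols
theorem outerFold_length (g : List (List String)) (cols n : Nat) :
    ((List.range n).foldl (fun res i =>
        (List.range cols).foldl
          (fun r j => r.set j (r.getD j [] ++ [(g.getD i []).getD j ""])) res)
      (List.replicate cols ([] : List String))).length = cols := by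
  induction n with
  | zero => simp
  | succ n ih =>
    rw [List.range_succ, List.foldl_append, List.foldl_cons, List.foldl_nil,
      innerFold_length, ih]

-- the outer transpose loop: column k holds exactly the grid entries (i, k), i < n
theorem outerFold_getElem? (g : List (List String)) (cols n k : Nat) (hk : k < cols) :
    ((List.range n).foldl (fun res i =>
        (List.range cols).foldl
          (fun r j => r.set j (r.getD j [] ++ [(g.getD i []).getD j ""])) res)
      (List.replicate cols ([] : List String)))[k]? =
      some ((List.range n).map (fun i => (g.getD i []).getD k "")) := by
  induction n with
  | zero => simp [hk]
  | succ n ih =>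
    rw [List.range_succ, List.foldl_append, List.foldl_cons, List.foldl_nil,
      innerFold_getElem? _ List.nodup_range, ih]
    simp [hk]

-- a transposed column, read with getD at ANY index, is the corresponding grid entry read with getD
theorem col_getD (g : List (List String)) (k i : Nat) (hi : i < g.length) :
    ((List.range g.length).map (fun i => (g.getD i []).getD k "")).getD i "" =
      (g.getD i []).getD k "" := by
  rw [List.getD_eq_getElem _ _ (by simpa using hi)]
  simp

-- the set of four values is a singleton exactly when they are chained-equal
theorem set4_len (a b c d : String) :
    ((PySem.Set.ofList [a, b, c, d]).length == 1) = ((a == b) && (b == c) && (c == d)) := by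
  by_cases hab : a = b <;> by_cases hbc : b = c <;> by_cases hcd : c = d <;>
    simp [PySem.Set.ofList, PySem.Set.add, PySem.Set.contains, hab, hbc, hcd] <;> aesop

-- the two ports agree whenever the grid has 8+ rows or an empty first row (as Pre_ guarantees)
theorem ports_eq (g : List (List String))
    (hrows : (g.getD 0 []).length = 0 ∨ 8 ≤ g.length) :
    un_responsable_por_turno g = un_responsable_por_turno_alt g := by
  unfold un_responsable_por_turno un_responsable_por_turno_alt transponerA
  rw [PySem.List.foldl_append_singleton_eq_map, List.nil_append, List.zip_map']
  apply List.ext_getElem?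
  intro j
  rw [List.getElem?_map, List.getElem?_map]
  by_cases hj : j < (g.getD 0 []).length
  · have h8 : 8 ≤ g.length := by omega
    rw [outerFold_getElem? g _ g.length j hj, List.getElem?_range hj]
    simp only [Option.map_some]
    congr 1
    have he : ∀ i, i < 8 →
        ((List.range g.length).map (fun i => (g.getD i []).getD j "")).getD i "" =
          (g.getD i []).getD j "" := fun i hi => col_getD g j i (by omega)
    rw [equal_from_toA_eq_all, equal_from_toA_eq_all]
    have h03 : List.range' 0 (3 - 0) = [0, 1, 2] := rfl
    have h47 : List.range' 4 (7 - 4) = [4, 5, 6] := rfl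
    have h04 : List.range' 0 4 = [0, 1, 2, 3] := rfl
    have h44 : List.range' 4 4 = [4, 5, 6, 7] := rfl
    rw [h03, h47, h04, h44]
    simp only [List.all_cons, List.all_nil, List.map_cons, List.map_nil, Bool.and_true]
    rw [he 0 (by omega), he 1 (by omega), he 2 (by omega), he 3 (by omega),
      he 4 (by omega), he 5 (by omega), he 6 (by omega), he 7 (by omega),
      set4_len, set4_len]
    simp [Bool.and_assoc]
  · rw [List.getElem?_eq_none (l := List.range ((g.getD 0 []).length)) (by simpa using hj),
      List.getElem?_eq_none (by rw [outerFold_length]; omega)]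
    rfl

-- ===== VERDICT (by name: the statement is the Claim_ definition above) =====
theorem un_responsable_por_turno_spec : Claim_equal_un_responsable_por_turno := by
  intro g _ hpre
  exact ports_eq g hpre.2.2
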